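-- pv_equiv track=rewrite | github.com/mcb273/cs4300sp2021-mcb273-aca76-cmh332-mt664-nhm39 | app/irsystem/models/search.py | intermediate
-- ===== SOURCE A (Python) =====
-- from collections import defaultdict, Counter
--
-- def intermediate(tuples):
--     result = defaultdict(list)
--     i = 0
--     for score, area_name in tuples:
--         result[area_name].append((i, score))
--         i += 1
--     for area_name in result:
--         result[area_name].sort(key=lambda x: x[1], reverse=True)
--     return result
-- ===== SOURCE B (Python) =====
-- def intermediate(tuples):
--     indexed = [(name, (i, score)) for i, (score, name) in enumerate(tuples)]
--     keys = list(dict.fromkeys(name for name, _ in indexed))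
--     return {k: sorted((p for name, p in indexed if name == k),
--                       key=lambda x: x[1], reverse=True)
--             for k in keys}
-- ===== Notes on version B (the rewrite author's own statement) =====
-- stated objective: alternative
-- what changed: Replaces A's mutable defaultdict accumulation with in-place per-bucket sorting by a dict-free comprehension: dedup the names in first-appearance order, then build each group by filtering the enumerated list and sorting it once per key.
import Mathlib
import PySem

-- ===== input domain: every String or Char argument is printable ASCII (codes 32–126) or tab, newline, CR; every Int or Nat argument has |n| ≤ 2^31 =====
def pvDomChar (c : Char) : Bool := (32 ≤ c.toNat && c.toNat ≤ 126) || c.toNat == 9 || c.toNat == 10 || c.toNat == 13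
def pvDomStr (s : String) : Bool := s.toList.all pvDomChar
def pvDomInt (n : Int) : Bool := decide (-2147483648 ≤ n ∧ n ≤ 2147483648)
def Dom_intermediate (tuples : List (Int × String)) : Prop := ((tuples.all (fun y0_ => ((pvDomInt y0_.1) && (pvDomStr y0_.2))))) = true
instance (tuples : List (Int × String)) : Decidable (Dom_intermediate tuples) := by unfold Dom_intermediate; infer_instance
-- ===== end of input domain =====

-- B replaces A's dict-accumulation + per-bucket in-place sort by a dict-free comprehension:
-- dedup the names in first-appearance order, then filter-and-sort the enumerated list per key (alternative decomposition, same result).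


-- ===== PORT A =====
-- result = defaultdict(list); i = 0; for score, area_name in tuples: result[area_name].append((i, score)); i += 1
-- for area_name in result: result[area_name].sort(key=lambda x: x[1], reverse=True)
def intermediate (tuples : List (Int × String)) : List (String × List (Int × Int)) :=
  let st := tuples.foldl
    (fun (st : PySem.Dict String (List (Int × Int)) × Int) t =>
      (st.1.modify t.2 [] (fun l => l ++ [(st.2, t.1)]), st.2 + 1))
    (PySem.Dict.empty, 0)
  let result := st.1
  let result := result.keys.foldl
    (fun d k => d.modify k [] (fun l => PySem.List.sorted l (fun x => x.2) true)) result
  result.items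

-- ===== PORT B =====
def intermediate_alt (tuples : List (Int × String)) : List (String × List (Int × Int)) :=
  let indexed := (PySem.List.enumerate tuples 0).map (fun p => (p.2.2, (p.1, p.2.1)))
  let keys := PySem.List.dedup (indexed.map (fun q => q.1))
  keys.map (fun k =>
    (k, PySem.List.sorted ((indexed.filter (fun q => q.1 == k)).map (fun q => q.2))
          (fun x => x.2) true))

-- ===== PRECONDITION & SPEC =====
def Spec_intermediate (tuples : List (Int × String)) (out : List (String × List (Int × Int))) : Prop := out = intermediate_alt tuples
instance (tuples : List (Int × String)) (out : List (String × List (Int × Int))) : Decidable (Spec_intermediate tuples out) := by unfold Spec_intermediate; infer_instance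

-- ===== CLAIM (what is proved, stated in full; the proofs are below) =====
def Claim_equal_intermediate : Prop := ∀ (tuples : List (Int × String)), Dom_intermediate tuples → Spec_intermediate tuples (intermediate tuples)

-- ===== LEMMAS AND PROOFS =====

-- A's first loop, carrying the counter i, equals a fold over the enumerated list.
theorem loopA_eq_foldl_enumerate (tuples : List (Int × String))
    (d : PySem.Dict String (List (Int × Int))) (i : Int) :
    tuples.foldl
      (fun (st : PySem.Dict String (List (Int × Int)) × Int) t =>
        (st.1.modify t.2 [] (fun l => l ++ [(st.2, t.1)]), st.2 + 1)) (d, i)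
    = (((PySem.List.enumerate tuples i).map (fun p => (p.2.2, (p.1, p.2.1)))).foldl
        (fun d p => d.modify p.1 [] (fun l => l ++ [p.2])) d,
       i + tuples.length) := by
  induction tuples generalizing d i with
  | nil => simp [PySem.List.enumerate_nil]
  | cons t ts ih =>
      simp only [List.foldl_cons, PySem.List.enumerate_cons, List.map_cons, ih]
      simp only [List.length_cons]
      congr 1
      push_cast; ring

-- getD of the second loop (sorting each existing bucket once; keys are Nodup).
theorem getD_foldl_modify_sort {f : List (Int × Int) → List (Int × Int)}
    (ks : List String) (hnd : ks.Nodup)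
    (d : PySem.Dict String (List (Int × Int))) (c : String) :
    (ks.foldl (fun d k => d.modify k [] f) d).getD c []
      = if c ∈ ks then f (d.getD c []) else d.getD c [] := by
  induction ks generalizing d with
  | nil => simp
  | cons k ks ih =>
      simp only [List.foldl_cons]
      rcases List.nodup_cons.mp hnd with ⟨hk, hnd'⟩
      rw [ih hnd']
      by_cases hc : c ∈ ks
      · have hck : c ≠ k := fun h => hk (h ▸ hc)
        simp [hc, PySem.Dict.getD_modify, hck]
      · by_cases hck : c = k
        · subst hck
          simp [hc]
        · simp [hc, hck, PySem.Dict.getD_modify]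

theorem intermediate_eq (tuples : List (Int × String)) :
    intermediate tuples = intermediate_alt tuples := by
  unfold intermediate intermediate_alt
  rw [loopA_eq_foldl_enumerate]
  set l := (PySem.List.enumerate tuples 0).map (fun p => (p.2.2, (p.1, p.2.1))) with hl
  set d1 := l.foldl (fun d p => d.modify p.1 [] (fun l => l ++ [p.2])) (PySem.Dict.empty) with hd1
  have hkeys : d1.keys = PySem.List.dedup (l.map (fun q => q.1)) := by
    rw [hd1, PySem.Dict.keys_foldl_modify_key l (fun p => p.1) []
      (fun _ p => fun acc => acc ++ [p.2]) PySem.Dict.empty,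
      PySem.Dict.keys_empty, PySem.Set.update_nil_left, PySem.List.dedup_eq_ofList]
  have hnd : d1.keys.Nodup := by
    rw [hkeys]; exact PySem.List.nodup_dedup _
  have hgd : ∀ c, d1.getD c [] = (l.filter (fun p => p.1 == c)).map (fun q => q.2) := by
    intro c
    rw [hd1, PySem.Dict.getD_foldl_modify_append]
    simp
  set d2 := d1.keys.foldl
    (fun d k => d.modify k [] (fun l => PySem.List.sorted l (fun x => x.2) true)) d1 with hd2
  have hkeys2 : d2.keys = d1.keys := by
    rw [hd2, PySem.Dict.keys_foldl_modify d1.keys []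
      (fun _ _ => fun acc => PySem.List.sorted acc (fun x => x.2) true) d1,
      PySem.Set.update_eq_append_filter]
    have : (PySem.Set.ofList d1.keys).filter (fun y => !(PySem.Set.contains d1.keys y)) = [] := by
      apply List.filter_eq_nil_iff.mpr
      intro y hy
      have hy' : y ∈ d1.keys := (PySem.Set.mem_ofList _ _).mp hy
      simpa using hy'
    rw [this, List.append_nil]
  have hnd2 : d2.keys.Nodup := hkeys2 ▸ hnd
  rw [PySem.Dict.items_eq_map_keys d2 hnd2 []]
  rw [hkeys2, hkeys]
  apply List.map_congr_left
  intro k hk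
  have hmem : k ∈ d1.keys := by rw [hkeys]; exact hk
  rw [hd2, getD_foldl_modify_sort d1.keys hnd d1 k]
  simp [hmem, hgd k]

-- ===== VERDICT (by name: the statement is the Claim_ definition above) =====
theorem intermediate_spec : Claim_equal_intermediate := by
  intro tuples _
  unfold Spec_intermediate
  exact intermediate_eq tuples
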